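-- pv_equiv track=rewrite | github.com/KaihuaQin/KaihuaQin.github.io | generate_publications.py | convert_latex_chars
-- ===== SOURCE A (Python) =====
-- def convert_latex_chars(text):
--     """Convert LaTeX special characters to Unicode"""
--     latex_to_unicode = {
--         # Umlaut/diaeresis
--         '{\"a}': 'ä',
--         '{\"o}': 'ö',
--         '{\"u}': 'ü',
--         '{\"A}': 'Ä',
--         '{\"O}': 'Ö',
--         '{\"U}': 'Ü',
--         '{\"e}': 'ë',
--         '{\"i}': 'ï',
--         '{\"E}': 'Ë',
--         '{\"I}': 'Ï',
--         # Alternative umlaut syntax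
--         r'{\\"a}': 'ä',
--         r'{\\"o}': 'ö',
--         r'{\\"u}': 'ü',
--         r'{\\"A}': 'Ä',
--         r'{\\"O}': 'Ö',
--         r'{\\"U}': 'Ü',
--         # Special characters
--         r'{\ss}': 'ß',
--         r'{\ae}': 'æ',
--         r'{\AE}': 'Æ',
--         r'{\oe}': 'œ',
--         r'{\OE}': 'Œ',
--         r'{\c c}': 'ç',
--         r'{\c C}': 'Ç',
--         # Acute accent
--         r"{\\'a}": 'á',
--         r"{\\'e}": 'é',
--         r"{\\'i}": 'í',
--         r"{\\'o}": 'ó',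
--         r"{\\'u}": 'ú',
--         r"{\\'A}": 'Á',
--         r"{\\'E}": 'É',
--         r"{\\'I}": 'Í',
--         r"{\\'O}": 'Ó',
--         r"{\\'U}": 'Ú',
--         # Grave accent
--         r'{\`a}': 'à',
--         r'{\`e}': 'è',
--         r'{\`i}': 'ì',
--         r'{\`o}': 'ò',
--         r'{\`u}': 'ù',
--         r'{\`A}': 'À',
--         r'{\`E}': 'È',
--         r'{\`I}': 'Ì',
--         r'{\`O}': 'Ò',
--         r'{\`U}': 'Ù',
--         # Circumflex
--         r'{\^a}': 'â',
--         r'{\^e}': 'ê',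
--         r'{\^i}': 'î',
--         r'{\^o}': 'ô',
--         r'{\^u}': 'û',
--         r'{\^A}': 'Â',
--         r'{\^E}': 'Ê',
--         r'{\^I}': 'Î',
--         r'{\^O}': 'Ô',
--         r'{\^U}': 'Û',
--         # Tilde
--         r'{\~a}': 'ã',
--         r'{\~n}': 'ñ',
--         r'{\~o}': 'õ',
--         r'{\~A}': 'Ã',
--         r'{\~N}': 'Ñ',
--         r'{\~O}': 'Õ',
--     }
--
--     result = text
--     for latex, unicode_char in latex_to_unicode.items():
--         result = result.replace(latex, unicode_char)
--
--     return result
-- ===== SOURCE B (Python) =====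
-- def convert_latex_chars(text):
--     """Convert LaTeX special characters to Unicode: one left-to-right pass over the
--     text, matching against a table built by zipping two parallel literals."""
--     keys = r'''{"a}|{"o}|{"u}|{"A}|{"O}|{"U}|{"e}|{"i}|{"E}|{"I}|{\\"a}|{\\"o}|{\\"u}|{\\"A}|{\\"O}|{\\"U}|{\ss}|{\ae}|{\AE}|{\oe}|{\OE}|{\c c}|{\c C}|{\\'a}|{\\'e}|{\\'i}|{\\'o}|{\\'u}|{\\'A}|{\\'E}|{\\'I}|{\\'O}|{\\'U}|{\`a}|{\`e}|{\`i}|{\`o}|{\`u}|{\`A}|{\`E}|{\`I}|{\`O}|{\`U}|{\^a}|{\^e}|{\^i}|{\^o}|{\^u}|{\^A}|{\^E}|{\^I}|{\^O}|{\^U}|{\~a}|{\~n}|{\~o}|{\~A}|{\~N}|{\~O}'''.split('|')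
--     vals = 'äöüÄÖÜëïËÏäöüÄÖÜßæÆœŒçÇáéíóúÁÉÍÓÚàèìòùÀÈÌÒÙâêîôûÂÊÎÔÛãñõÃÑÕ'
--     pairs = list(zip(keys, vals))
--     out = []
--     i, n = 0, len(text)
--     while i < n:
--         if text[i] == '{':
--             for k, v in pairs:
--                 if text.startswith(k, i):
--                     out.append(v)
--                     i += len(k)
--                     break
--             else:
--                 out.append(text[i])
--                 i += 1
--         else:
--             out.append(text[i])
--             i += 1
--     return ''.join(out)
-- ===== Notes on version B (the rewrite author's own statement) =====
-- stated objective: alternative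
-- what changed: A runs 59 sequential full-string str.replace passes, one per dict entry; B builds the table by zipping a key literal with a value literal and makes a single left-to-right pass over the text, emitting the Unicode value of the first key matching at each position (correct because keys are prefix-free, start with '{', and values are non-ASCII so A's passes cannot interact).
import Mathlib
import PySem

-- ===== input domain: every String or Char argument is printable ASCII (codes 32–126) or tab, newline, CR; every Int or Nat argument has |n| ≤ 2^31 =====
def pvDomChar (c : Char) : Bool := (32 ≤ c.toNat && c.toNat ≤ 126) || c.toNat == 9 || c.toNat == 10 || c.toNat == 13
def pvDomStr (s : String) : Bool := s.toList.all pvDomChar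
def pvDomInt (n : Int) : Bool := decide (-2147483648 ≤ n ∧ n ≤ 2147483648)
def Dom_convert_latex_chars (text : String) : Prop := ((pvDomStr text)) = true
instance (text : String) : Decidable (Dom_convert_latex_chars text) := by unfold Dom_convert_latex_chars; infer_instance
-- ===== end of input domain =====

-- B replaces A's 59 sequential full-string replace passes by a single left-to-right pass over the
-- text, against a table built by zipping two parallel literals (objective: alternative).

-- ===== PORT A =====
-- A's dict literal, in insertion order (no duplicate keys).
def pvTable : List (String × String) := [
  ("{\"a}", "ä"),
  ("{\"o}", "ö"),
  ("{\"u}", "ü"),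
  ("{\"A}", "Ä"),
  ("{\"O}", "Ö"),
  ("{\"U}", "Ü"),
  ("{\"e}", "ë"),
  ("{\"i}", "ï"),
  ("{\"E}", "Ë"),
  ("{\"I}", "Ï"),
  ("{\\\\\"a}", "ä"),
  ("{\\\\\"o}", "ö"),
  ("{\\\\\"u}", "ü"),
  ("{\\\\\"A}", "Ä"),
  ("{\\\\\"O}", "Ö"),
  ("{\\\\\"U}", "Ü"),
  ("{\\ss}", "ß"),
  ("{\\ae}", "æ"),
  ("{\\AE}", "Æ"),
  ("{\\oe}", "œ"),
  ("{\\OE}", "Œ"),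
  ("{\\c c}", "ç"),
  ("{\\c C}", "Ç"),
  ("{\\\\'a}", "á"),
  ("{\\\\'e}", "é"),
  ("{\\\\'i}", "í"),
  ("{\\\\'o}", "ó"),
  ("{\\\\'u}", "ú"),
  ("{\\\\'A}", "Á"),
  ("{\\\\'E}", "É"),
  ("{\\\\'I}", "Í"),
  ("{\\\\'O}", "Ó"),
  ("{\\\\'U}", "Ú"),
  ("{\\`a}", "à"),
  ("{\\`e}", "è"),
  ("{\\`i}", "ì"),
  ("{\\`o}", "ò"),
  ("{\\`u}", "ù"),
  ("{\\`A}", "À"),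
  ("{\\`E}", "È"),
  ("{\\`I}", "Ì"),
  ("{\\`O}", "Ò"),
  ("{\\`U}", "Ù"),
  ("{\\^a}", "â"),
  ("{\\^e}", "ê"),
  ("{\\^i}", "î"),
  ("{\\^o}", "ô"),
  ("{\\^u}", "û"),
  ("{\\^A}", "Â"),
  ("{\\^E}", "Ê"),
  ("{\\^I}", "Î"),
  ("{\\^O}", "Ô"),
  ("{\\^U}", "Û"),
  ("{\\~a}", "ã"),
  ("{\\~n}", "ñ"),
  ("{\\~o}", "õ"),
  ("{\\~A}", "Ã"),
  ("{\\~N}", "Ñ"),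
  ("{\\~O}", "Õ")]

-- A: result = text; for each (latex, unicode_char) in the dict, result = result.replace(latex, unicode_char).
def convert_latex_chars (text : String) : String :=
  pvTable.foldl (fun r p => PySem.Str.replace r p.1 p.2) text

-- ===== PORT B =====
-- Source B's two parallel literals: the '|'-separated key string and the value string.
def pvKeyStr : String := "{\"a}|{\"o}|{\"u}|{\"A}|{\"O}|{\"U}|{\"e}|{\"i}|{\"E}|{\"I}|{\\\\\"a}|{\\\\\"o}|{\\\\\"u}|{\\\\\"A}|{\\\\\"O}|{\\\\\"U}|{\\ss}|{\\ae}|{\\AE}|{\\oe}|{\\OE}|{\\c c}|{\\c C}|{\\\\'a}|{\\\\'e}|{\\\\'i}|{\\\\'o}|{\\\\'u}|{\\\\'A}|{\\\\'E}|{\\\\'I}|{\\\\'O}|{\\\\'U}|{\\`a}|{\\`e}|{\\`i}|{\\`o}|{\\`u}|{\\`A}|{\\`E}|{\\`I}|{\\`O}|{\\`U}|{\\^a}|{\\^e}|{\\^i}|{\\^o}|{\\^u}|{\\^A}|{\\^E}|{\\^I}|{\\^O}|{\\^U}|{\\~a}|{\\~n}|{\\~o}|{\\~A}|{\\~N}|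{\\~O}"
def pvValStr : String := "äöüÄÖÜëïËÏäöüÄÖÜßæÆœŒçÇáéíóúÁÉÍÓÚàèìòùÀÈÌÒÙâêîôûÂÊÎÔÛãñõÃÑÕ"

-- pairs = list(zip(keys.split('|'), vals))  (str.split with a one-char separator = List.splitOn, exact here)
def pvPairsB : List (List Char × Char) := List.zip (pvKeyStr.toList.splitOn '|') pvValStr.toList

-- Source B's while loop over index i: at a position starting with '{', the first pair whose key matches
-- there is emitted as its value char and the key skipped; otherwise the character is copied.
-- (ported by hand over List Char: exact — `text.startswith(k, i)` = isPrefixOf at the current suffix,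
--  `i += len(k)` = dropping the key; `List.drop (kv.1.length - 1) t` is `List.drop kv.1.length (c :: t)` for the nonempty keys.)
def pvScanB (L : List (List Char × Char)) (s : List Char) : List Char :=
  match s with
  | [] => []
  | c :: t =>
    if c = '{' then
      match L.find? (fun p => p.1.isPrefixOf (c :: t)) with
      | some kv => kv.2 :: pvScanB L (List.drop (kv.1.length - 1) t)
      | none => c :: pvScanB L t
    else c :: pvScanB L t
termination_by s.length
decreasing_by
  all_goals (simp only [List.length_cons, List.length_drop]; omega)

def convert_latex_chars_alt (text : String) : String :=
  String.ofList (pvScanB pvPairsB text.toList)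

-- ===== PRECONDITION & SPEC =====
def Spec_convert_latex_chars (text : String) (out : String) : Prop := out = convert_latex_chars_alt text
instance (text : String) (out : String) : Decidable (Spec_convert_latex_chars text out) := by unfold Spec_convert_latex_chars; infer_instance

-- ===== CLAIM (what is proved, stated in full; the proofs are below) =====
def Claim_equal_convert_latex_chars : Prop := ∀ (text : String), Dom_convert_latex_chars text → Spec_convert_latex_chars text (convert_latex_chars text)

-- ===== LEMMAS AND PROOFS =====

-- A's table on code points, values as char lists (proof-side normal form shared by both reductions).
def pvTableC : List (List Char × List Char) := pvTable.map (fun p => (p.1.toList, p.2.toList))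

-- generic single-pass scanner with List-Char values (proof vehicle connecting both ports)
def pvScan (L : List (List Char × List Char)) (s : List Char) : List Char :=
  match s with
  | [] => []
  | c :: t =>
    if c = '{' then
      match L.find? (fun p => p.1.isPrefixOf (c :: t)) with
      | some kv => kv.2 ++ pvScan L (List.drop (kv.1.length - 1) t)
      | none => c :: pvScan L t
    else c :: pvScan L t
termination_by s.length
decreasing_by
  all_goals (simp only [List.length_cons, List.length_drop]; omega)

-- key/value shape that makes the two strategies agree:
-- keys are nonempty, start with '{', contain '{' only there, and are ASCII;
-- values are single non-ASCII characters (so replacements never create or destroy matches).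
def pvGoodKey (k : List Char) : Prop :=
  k ≠ [] ∧ k.head? = some '{' ∧ '{' ∉ k.tail ∧ k.all (fun c => c ≤ '~') = true
def pvGoodVal (v : List Char) : Prop := v.length = 1 ∧ v.all (fun c => '~' < c) = true

theorem pv_key_ascii {k : List Char} (h : pvGoodKey k) : ∀ c ∈ k, c ≤ '~' :=
  fun c hc => of_decide_eq_true (List.all_eq_true.mp h.2.2.2 c hc)
theorem pv_val_big {v : List Char} (h : pvGoodVal v) : ∀ c ∈ v, '~' < c :=
  fun c hc => of_decide_eq_true (List.all_eq_true.mp h.2 c hc)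
def pvGoodTable (L : List (List Char × List Char)) : Prop := ∀ p ∈ L, pvGoodKey p.1 ∧ pvGoodVal p.2

theorem pvScan_some (L : List (List Char × List Char)) (c : Char) (t : List Char)
    (kv : List Char × List Char) (hc : c = '{')
    (h : L.find? (fun p => p.1.isPrefixOf (c :: t)) = some kv) :
    pvScan L (c :: t) = kv.2 ++ pvScan L (List.drop (kv.1.length - 1) t) := by
  rw [pvScan, if_pos hc, h]

theorem pvScan_none (L : List (List Char × List Char)) (c : Char) (t : List Char)
    (h : L.find? (fun p => p.1.isPrefixOf (c :: t)) = none) :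
    pvScan L (c :: t) = c :: pvScan L t := by
  rw [pvScan]
  by_cases hc : c = '{'
  · rw [if_pos hc, h]
  · rw [if_neg hc]

-- clean structural form of Python str.replace (old nonempty)
def pvRep (k v : List Char) (s : List Char) : List Char :=
  match s with
  | [] => []
  | c :: t => if k.isPrefixOf (c :: t) then v ++ pvRep k v (List.drop (k.length - 1) t)
              else c :: pvRep k v t
termination_by s.length
decreasing_by
  · simp only [List.length_cons, List.length_drop]; omega
  · simp

theorem pv_drop_len_cons {k : List Char} (hk : k ≠ []) (c : Char) (t : List Char) :
    List.drop k.length (c :: t) = List.drop (k.length - 1) t := by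
  cases k with
  | nil => exact absurd rfl hk
  | cons a l => simp

theorem pv_go_eq (k v : List Char) (hk : k ≠ []) :
    ∀ (fuel : Nat) (l acc : List Char), l.length ≤ fuel →
      PySem.Chars.replace.go k v fuel l acc = acc.reverse ++ pvRep k v l := by
  intro fuel
  induction fuel with
  | zero =>
    intro l acc h
    have hl : l = [] := List.eq_nil_of_length_eq_zero (Nat.le_zero.mp h)
    subst hl
    simp [PySem.Chars.replace.go, pvRep]
  | succ n ih =>
    intro l acc h
    cases l with
    | nil => simp [PySem.Chars.replace.go, pvRep]
    | cons c t =>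
      by_cases hp : k.isPrefixOf (c :: t) = true
      · rw [PySem.Chars.replace.go]
        simp only [hp, if_true]
        have hlen : (List.drop k.length (c :: t)).length ≤ n := by
          have : 1 ≤ k.length := by
            cases k with
            | nil => exact absurd rfl hk
            | cons _ _ => simp
          simp only [List.length_drop, List.length_cons]
          simp only [List.length_cons] at h
          omega
        rw [ih _ _ hlen, pv_drop_len_cons hk]
        rw [pvRep]
        simp [hp]
      · rw [PySem.Chars.replace.go]
        simp only [hp]
        have hlen : t.length ≤ n := by simp only [List.length_cons] at h; omega
        rw [ih _ _ hlen]
        rw [pvRep]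
        simp [hp]

theorem pv_replace_eq (k v s : List Char) (hk : k ≠ []) :
    PySem.Chars.replace s k v = pvRep k v s := by
  have hne : k.isEmpty = false := by cases k with
    | nil => exact absurd rfl hk
    | cons _ _ => simp
  rw [PySem.Chars.replace, hne]
  simp only [Bool.false_eq_true, if_false]
  simpa using pv_go_eq k v hk s.length s [] (le_refl _)

theorem pv_scan_nil_table (s : List Char) : pvScan [] s = s := by
  induction s with
  | nil => rw [pvScan]
  | cons c t ih => rw [pvScan_none _ _ _ (by simp), ih]

-- scan copies a region in which no table key matches at any position
theorem pv_scan_copy (L : List (List Char × List Char)) :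
    ∀ (u r : List Char),
      (∀ i < u.length, L.find? (fun p => p.1.isPrefixOf (List.drop i (u ++ r))) = none) →
      pvScan L (u ++ r) = u ++ pvScan L r := by
  intro u
  induction u with
  | nil => intro r _; simp
  | cons c u' ih =>
    intro r h
    have h0 : L.find? (fun p => p.1.isPrefixOf (c :: (u' ++ r))) = none := by
      have := h 0 (by simp)
      simpa using this
    rw [List.cons_append, pvScan_none _ _ _ h0]
    have hrest : pvScan L (u' ++ r) = u' ++ pvScan L r := by
      apply ih
      intro i hi
      have := h (i + 1) (by simpa using Nat.succ_lt_succ hi)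
      simpa using this
    rw [hrest]
    simp

-- a key that does not match the original suffix does not match the scanned suffix either
theorem pv_no_fake (L : List (List Char × List Char)) (hL : pvGoodTable L) :
    ∀ (s k : List Char), k ≠ [] → (∀ c ∈ k, c ≤ '~') →
      L.find? (fun p => p.1.isPrefixOf s) = none → ¬ k <+: s → ¬ k <+: pvScan L s := by
  intro s
  induction s with
  | nil =>
    intro k hk _ _ _
    rw [pvScan]
    intro hpre
    exact hk (List.prefix_nil.mp hpre)
  | cons c t ih =>
    intro k hk hascii hnone hnot
    rw [pvScan_none _ _ _ hnone]
    intro hpre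
    cases k with
    | nil => exact hk rfl
    | cons k0 k' =>
      rw [List.cons_prefix_cons] at hpre
      obtain ⟨hk0, hk'⟩ := hpre
      subst hk0
      cases hk'' : k' with
      | nil => exact hnot (by simp [hk'', List.cons_prefix_cons])
      | cons a l =>
        subst hk''
        rcases hfind : L.find? (fun p => p.1.isPrefixOf t) with _ | p
        · exact ih (a :: l) (by simp) (fun ch hch => hascii ch (by simp [hch]))
            hfind (fun hp => hnot (by simp [List.cons_prefix_cons, hp])) hk'
        · -- head of t matches a key: the scanned suffix starts with a non-ASCII value char
          have hmem := List.mem_of_find?_eq_some hfind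
          have hptrue := List.find?_some hfind
          have hvbig := pv_val_big (hL p hmem).2
          obtain ⟨w0, hw0⟩ := List.length_eq_one_iff.mp (hL p hmem).2.1
          cases t with
          | nil =>
            have : p.1 <+: ([] : List Char) := List.isPrefixOf_iff_prefix.mp hptrue
            exact (hL p hmem).1.1 (List.prefix_nil.mp this)
          | cons c' t' =>
            have hc' : c' = '{' := by
              have hpref := List.isPrefixOf_iff_prefix.mp hptrue
              obtain ⟨hq1, hq2, _, _⟩ := (hL p hmem).1
              cases hqe : p.1 with
              | nil => exact absurd hqe hq1
              | cons q0 q' =>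
                rw [hqe] at hpref hq2
                have hq0c := (List.cons_prefix_cons.mp hpref).1
                simp only [List.head?_cons, Option.some.injEq] at hq2
                rw [← hq0c, hq2]
            rw [pvScan_some _ _ _ _ hc' hfind, hw0] at hk'
            rw [List.singleton_append, List.cons_prefix_cons] at hk'
            have ha : a ≤ '~' := hascii a (by simp)
            have hb : '~' < w0 := hvbig w0 (by simp [hw0])
            rw [← hk'.1] at hb
            exact absurd hb (not_lt.mpr ha)

theorem pv_main (L : List (List Char × List Char)) (hL : pvGoodTable L)
    (k : List Char) (w : Char) (hk : pvGoodKey k) (_hw : '~' < w) :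
    ∀ (s : List Char),
      pvRep k [w] (pvScan L s) = pvScan (L ++ [(k, [w])]) s := by
  have hkA := pv_key_ascii hk
  obtain ⟨hkne, hkhead, hktail, _⟩ := hk
  obtain ⟨k0, k', rfl⟩ : ∃ k0 k', k = k0 :: k' := by
    cases k with
    | nil => exact absurd rfl hkne
    | cons a b => exact ⟨a, b, rfl⟩
  have hk0 : k0 = '{' := by simpa using hkhead
  subst hk0
  suffices H : ∀ (n : Nat) (s : List Char), s.length ≤ n →
      pvRep ('{' :: k') [w] (pvScan L s) = pvScan (L ++ [('{' :: k', [w])]) s by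
    intro s; exact H s.length s (le_refl _)
  intro n
  induction n with
  | zero =>
    intro s hs
    have : s = [] := List.eq_nil_of_length_eq_zero (Nat.le_zero.mp hs)
    subst this
    rw [pvScan, pvScan, pvRep]
  | succ n ih =>
    intro s hs
    cases s with
    | nil => rw [pvScan, pvScan, pvRep]
    | cons c t =>
      rcases hfind : L.find? (fun p => p.1.isPrefixOf (c :: t)) with _ | p
      · by_cases hpre : ('{' :: k') <+: (c :: t)
        · -- the new key matches here: scan copies the key region, replace consumes it
          obtain ⟨hc, hkt⟩ := List.cons_prefix_cons.mp hpre
          subst hc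
          obtain ⟨r, hr⟩ := hkt
          subst hr
          have hcopy : pvScan L (('{' :: k') ++ r) = ('{' :: k') ++ pvScan L r := by
            apply pv_scan_copy
            intro i hi
            rcases Nat.eq_zero_or_pos i with hi0 | hipos
            · subst hi0
              simpa using hfind
            · rw [List.find?_eq_none]
              intro q hq hpf
              obtain ⟨hq1, hq2, _, _⟩ := (hL q hq).1
              obtain ⟨q0, q', hqq⟩ : ∃ q0 q', q.1 = q0 :: q' := by
                cases hqe : q.1 with
                | nil => exact absurd hqe hq1
                | cons a b => exact ⟨a, b, rfl⟩
              have hq0 : q0 = '{' := by rw [hqq] at hq2; simpa using hq2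
              subst hq0
              have hi' : i < ('{' :: k').length := by simpa using hi
              have hdrop : List.drop i (('{' :: k') ++ r)
                  = ('{' :: k')[i] :: (List.drop (i + 1) (('{' :: k') ++ r)) := by
                rw [List.drop_eq_getElem_cons (by simp only [List.length_append, List.length_cons]; simp only [List.length_cons] at hi'; omega)]
                rw [List.getElem_append_left hi']
              rw [hqq, hdrop] at hpf
              have heq := (List.cons_prefix_cons.mp (List.isPrefixOf_iff_prefix.mp hpf)).1
              have hmem : ('{' :: k')[i] ∈ k' := by
                have hgg : ('{' :: k')[i] = k'[i - 1]'(by simp at hi' ⊢; omega) := by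
                  rcases i with _ | j
                  · omega
                  · simp
                rw [hgg]
                exact List.getElem_mem _
              rw [← heq] at hmem
              exact hktail hmem
          rw [← List.cons_append, hcopy]
          have hprep : pvRep ('{' :: k') [w] (('{' :: k') ++ pvScan L r)
              = w :: pvRep ('{' :: k') [w] (pvScan L r) := by
            rw [List.cons_append, pvRep]
            have hptrue : ('{' :: k').isPrefixOf ('{' :: (k' ++ pvScan L r)) = true := by
              rw [List.isPrefixOf_iff_prefix]
              exact List.cons_prefix_cons.mpr ⟨rfl, List.prefix_append _ _⟩
            rw [if_pos hptrue]
            have hlen1 : ('{' :: k').length - 1 = k'.length := by simp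
            rw [hlen1, List.drop_left]
            simp
          rw [hprep]
          have hrlen : r.length ≤ n := by
            simp at hs
            omega
          rw [ih r hrlen]
          have hfind' : (L ++ [('{' :: k', [w])]).find?
              (fun p => p.1.isPrefixOf ('{' :: (k' ++ r))) = some ('{' :: k', [w]) := by
            rw [List.find?_append]
            have h1 : L.find? (fun p => p.1.isPrefixOf ('{' :: (k' ++ r))) = none := by
              simpa using hfind
            rw [h1]
            simp [List.isPrefixOf_iff_prefix, List.prefix_append]
          rw [List.cons_append, pvScan_some _ _ _ _ rfl hfind']
          have hlen1 : (('{' :: k', [w]) : List Char × List Char).1.length - 1 = k'.length := by simp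
          rw [hlen1, List.drop_left]
          simp
        · -- no match at all at this position: both sides copy one character
          rw [pvScan_none _ _ _ hfind]
          have hnofake : ¬ ('{' :: k') <+: pvScan L (c :: t) :=
            pv_no_fake L hL (c :: t) ('{' :: k') (by simp) hkA hfind hpre
          rw [pvScan_none _ _ _ hfind] at hnofake
          rw [pvRep, if_neg (by rw [List.isPrefixOf_iff_prefix]; exact hnofake)]
          rw [ih t (by simp at hs; omega)]
          have hfind' : (L ++ [('{' :: k', [w])]).find?
              (fun p => p.1.isPrefixOf (c :: t)) = none := by
            rw [List.find?_append, hfind]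
            simp [List.isPrefixOf_iff_prefix, hpre]
          rw [pvScan_none _ _ _ hfind']
      · -- a table key matches first: both sides emit its non-ASCII value
        have hmem := List.mem_of_find?_eq_some hfind
        obtain ⟨⟨hp1, hp2, _, _⟩, hgv⟩ := hL p hmem
        have hvbig := pv_val_big hgv
        obtain ⟨w0, hw0⟩ := List.length_eq_one_iff.mp hgv.1
        have hcb : c = '{' := by
          have hptrue := List.find?_some hfind
          have hpref := List.isPrefixOf_iff_prefix.mp hptrue
          cases hqe : p.1 with
          | nil => exact absurd hqe hp1
          | cons q0 q' =>
            rw [hqe] at hpref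
            have hq0c := (List.cons_prefix_cons.mp hpref).1
            rw [hqe] at hp2
            simp only [List.head?_cons, Option.some.injEq] at hp2
            rw [← hq0c, hp2]
        rw [pvScan_some _ _ _ _ hcb hfind, hw0]
        have hnp : ('{' :: k').isPrefixOf
            (w0 :: (pvScan L (List.drop (p.1.length - 1) t))) = false := by
          rw [Bool.eq_false_iff]
          intro habs
          have heq := (List.cons_prefix_cons.mp (List.isPrefixOf_iff_prefix.mp habs)).1
          have hb := hvbig w0 (by simp [hw0])
          rw [← heq] at hb
          exact absurd hb (by decide)
        rw [List.singleton_append, pvRep, hnp]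
        simp only [Bool.false_eq_true, if_false]
        rw [ih _ (by simp at hs ⊢; omega)]
        have hfind' : (L ++ [('{' :: k', [w])]).find?
            (fun p => p.1.isPrefixOf (c :: t)) = some p := by
          rw [List.find?_append, hfind]; rfl
        rw [pvScan_some _ _ _ _ hcb hfind', hw0]
        simp

theorem pv_fold (T : List (List Char × List Char)) (hT : pvGoodTable T) (s : List Char) :
    T.foldl (fun r p => PySem.Chars.replace r p.1 p.2) s = pvScan T s := by
  induction T using List.reverseRecOn with
  | nil => simp [pv_scan_nil_table]
  | append_singleton T p ihT =>
    have hT' : pvGoodTable T := fun q hq => hT q (List.mem_append_left _ hq)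
    obtain ⟨⟨hp1, hp2, hp3, hp4⟩, hgv⟩ := hT p (by simp)
    have hvbig := pv_val_big hgv
    obtain ⟨w0, hw0⟩ := List.length_eq_one_iff.mp hgv.1
    rw [List.foldl_append, ihT hT']
    simp only [List.foldl_cons, List.foldl_nil]
    rw [pv_replace_eq _ _ _ hp1, hw0]
    have hm := pv_main T hT' p.1 w0 ⟨hp1, hp2, hp3, hp4⟩ (hvbig w0 (by simp [hw0])) s
    rw [hm]
    have : ((p.1, [w0]) : List Char × List Char) = p := by
      rw [← hw0]
    rw [this]

theorem pv_str_fold (T : List (String × String)) (s : String) :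
    (T.foldl (fun r p => PySem.Str.replace r p.1 p.2) s).toList
      = (T.map (fun p => (p.1.toList, p.2.toList))).foldl
          (fun r p => PySem.Chars.replace r p.1 p.2) s.toList := by
  induction T generalizing s with
  | nil => simp
  | cons p T ih =>
    simp only [List.map_cons, List.foldl_cons]
    rw [ih (PySem.Str.replace s p.1 p.2), PySem.Str.toList_replace]

theorem pv_table_good : pvGoodTable pvTableC := by
  intro p hp
  unfold pvTableC pvTable at hp
  simp only [List.map_cons, List.map_nil, List.mem_cons, List.not_mem_nil, or_false] at hp
  rcases hp with rfl|rfl|rfl|rfl|rfl|rfl|rfl|rfl|rfl|rfl|rfl|rfl|rfl|rfl|rfl|rfl|rfl|rfl|rfl|rfl|rfl|rfl|rfl|rfl|rfl|rfl|rfl|rfl|rfl|rfl|rfl|rfl|rfl|rfl|rfl|rfl|rfl|rfl|rfl|rfl|rfl|rfl|rfl|rfl|rfl|rfl|rfl|rfl|rfl|rfl|rfl|rfl|rfl|rfl|rfl|rfl|rfl|rfl|rfl <;>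
    exact ⟨by unfold pvGoodKey; decide, by unfold pvGoodVal; decide⟩

-- B's zipped pairs, lifted to list values, are exactly A's table on code points
set_option maxRecDepth 4000 in
theorem pv_pairs_eq : pvPairsB.map (fun p => (p.1, [p.2])) = pvTableC := by decide

-- B's scanner agrees with the generic scanner on the lifted table
theorem pv_scanB_eq (L : List (List Char × Char)) :
    ∀ (n : Nat) (s : List Char), s.length ≤ n →
      pvScanB L s = pvScan (L.map (fun p => (p.1, [p.2]))) s := by
  intro n
  induction n with
  | zero =>
    intro s hs
    have : s = [] := List.eq_nil_of_length_eq_zero (Nat.le_zero.mp hs)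
    subst this
    rw [pvScanB, pvScan]
  | succ n ih =>
    intro s hs
    cases s with
    | nil => rw [pvScanB, pvScan]
    | cons c t =>
      have hfm : (L.map (fun p => (p.1, [p.2]))).find?
          (fun p => p.1.isPrefixOf (c :: t))
          = (L.find? (fun p => p.1.isPrefixOf (c :: t))).map (fun p => (p.1, [p.2])) := by
        rw [List.find?_map]; rfl
      rw [pvScanB, pvScan]
      by_cases hc : c = '{'
      · rw [if_pos hc, if_pos hc, hfm]
        rcases hfind : L.find? (fun p => p.1.isPrefixOf (c :: t)) with _ | kv
        · rw [hfind]
          show c :: pvScanB L t = c :: pvScan (L.map (fun p => (p.1, [p.2]))) t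
          rw [ih t (by simp at hs; omega)]
        · rw [hfind]
          show kv.2 :: pvScanB L (List.drop (kv.1.length - 1) t)
              = [kv.2] ++ pvScan (L.map (fun p => (p.1, [p.2]))) (List.drop (kv.1.length - 1) t)
          rw [ih (List.drop (kv.1.length - 1) t)
              (by simp only [List.length_drop]; simp at hs; omega)]
          rfl
      · rw [if_neg hc, if_neg hc]
        rw [ih t (by simp at hs; omega)]

-- ===== VERDICT (by name: the statement is the Claim_ definition above) =====
theorem convert_latex_chars_spec : Claim_equal_convert_latex_chars := by
  intro text _
  unfold Spec_convert_latex_chars convert_latex_chars convert_latex_chars_alt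
  have h := pv_str_fold pvTable text
  have hc : pvTable.map (fun p => (p.1.toList, p.2.toList)) = pvTableC := rfl
  rw [hc, pv_fold pvTableC pv_table_good] at h
  rw [pv_scanB_eq pvPairsB text.toList.length text.toList (le_refl _), pv_pairs_eq, ← h]
  rw [String.ofList_toList]
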